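-- pv_equiv track=rewrite | github.com/AA-Kevin-tech/n8n---Structured-Gov | structured_governor.py | derive_edit_targets
-- ===== SOURCE A (Python) =====
-- from typing import Any, Callable, Dict, List, Optional, Tuple
--
-- def derive_edit_targets(failures: List[Dict[str, str]]) -> List[str]:
--     targets: List[str] = []
--     codes = {f["error_code"] for f in failures}
--
--     if "SCHEMA_INVALID" in codes:
--         return ["/"]
--
--     if "GROUNDING_INCOMPLETE" in codes:
--         targets += [
--             "/grounding/task",
--             "/grounding/known_facts",
--             "/grounding/constraints",
--             "/grounding/output_contract",
--             "/grounding/verification_hooks",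
--         ]
--     if "EXPLORATION_INCOMPLETE" in codes:
--         targets += [
--             "/exploration/approach_options",
--             "/exploration/chosen_path",
--             "/exploration/tradeoffs",
--             "/exploration/alternative_interpretations",
--             "/exploration/timebox_plan/stop_condition",
--         ]
--     if "RESOLUTION_INCOMPLETE" in codes:
--         targets += [
--             "/resolution/answer",
--             "/resolution/options",
--             "/resolution/next_actions",
--         ]
--     if "DRIFT_TOO_HIGH" in codes:
--         targets += [
--             "/resolution/answer",
--             "/reflection/drift_flags",
--             "/reflection/drift_score",
--             "/reflection/clarity_edits",
--         ]
--     if "APPROVAL_NOT_GRANTED" in codes: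
--         targets += [
--             "/approval/constraints_passed",
--             "/approval/approved",
--             "/approval/reasons",
--         ]
--
--     targets.append("/telemetry/retry_count")
--     return sorted(set(targets))
-- ===== SOURCE B (Python) =====
-- from typing import Dict, List
--
-- _TARGET_MAP: Dict[str, tuple] = {
--     "GROUNDING_INCOMPLETE": (
--         "/grounding/task",
--         "/grounding/known_facts",
--         "/grounding/constraints",
--         "/grounding/output_contract",
--         "/grounding/verification_hooks",
--     ),
--     "EXPLORATION_INCOMPLETE": (
--         "/exploration/approach_options",
--         "/exploration/chosen_path",
--         "/exploration/tradeoffs",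
--         "/exploration/alternative_interpretations",
--         "/exploration/timebox_plan/stop_condition",
--     ),
--     "RESOLUTION_INCOMPLETE": (
--         "/resolution/answer",
--         "/resolution/options",
--         "/resolution/next_actions",
--     ),
--     "DRIFT_TOO_HIGH": (
--         "/resolution/answer",
--         "/reflection/drift_flags",
--         "/reflection/drift_score",
--         "/reflection/clarity_edits",
--     ),
--     "APPROVAL_NOT_GRANTED": (
--         "/approval/constraints_passed",
--         "/approval/approved",
--         "/approval/reasons",
--     ),
-- }
--
-- def derive_edit_targets(failures: List[Dict[str, str]]) -> List[str]:
--     codes = {f["error_code"] for f in failures}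
--     if "SCHEMA_INVALID" in codes:
--         return ["/"]
--     out = {"/telemetry/retry_count"}
--     for code in codes:
--         out.update(_TARGET_MAP.get(code, ()))
--     return sorted(out)
-- ===== Notes on version B (the rewrite author's own statement) =====
-- stated objective: idiomatic
-- what changed: Replaces the fixed chain of five membership ifs each extending a list with a code->paths table, a set accumulator seeded with the telemetry path, and one loop over the present codes updating the set from the table.
import Mathlib
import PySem

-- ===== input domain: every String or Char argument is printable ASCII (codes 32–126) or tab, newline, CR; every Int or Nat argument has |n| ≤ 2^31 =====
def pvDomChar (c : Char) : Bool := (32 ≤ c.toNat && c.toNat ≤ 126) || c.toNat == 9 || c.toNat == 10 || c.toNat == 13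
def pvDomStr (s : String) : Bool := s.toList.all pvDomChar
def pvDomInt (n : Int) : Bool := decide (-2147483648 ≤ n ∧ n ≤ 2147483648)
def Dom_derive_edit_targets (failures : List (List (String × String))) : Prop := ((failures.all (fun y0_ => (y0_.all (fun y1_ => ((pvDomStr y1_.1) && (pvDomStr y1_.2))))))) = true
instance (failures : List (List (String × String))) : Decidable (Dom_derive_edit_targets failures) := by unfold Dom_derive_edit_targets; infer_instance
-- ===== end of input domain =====

-- B replaces A's fixed if-chain by a code→paths table plus one set-update loop over the present codes (idiomatic; same cost).


-- codes = {f["error_code"] for f in failures}; inside Pre_ every dict has the key, so the getD "" default never fires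
def pvCodes (failures : List (List (String × String))) : PySem.Set String :=
  PySem.Set.ofList (failures.map (fun f => ((PySem.Dict.mk f).get? "error_code").getD ""))

-- ===== PORT A =====
def derive_edit_targets (failures : List (List (String × String))) : List String :=
  let codes := pvCodes failures
  if PySem.Set.contains codes "SCHEMA_INVALID" then ["/"]
  else
    let targets : List String := []
    let targets := if PySem.Set.contains codes "GROUNDING_INCOMPLETE" then
      targets ++ ["/grounding/task", "/grounding/known_facts", "/grounding/constraints",
                  "/grounding/output_contract", "/grounding/verification_hooks"] else targets
    let targets := if PySem.Set.contains codes "EXPLORATION_INCOMPLETE" then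
      targets ++ ["/exploration/approach_options", "/exploration/chosen_path", "/exploration/tradeoffs",
                  "/exploration/alternative_interpretations", "/exploration/timebox_plan/stop_condition"] else targets
    let targets := if PySem.Set.contains codes "RESOLUTION_INCOMPLETE" then
      targets ++ ["/resolution/answer", "/resolution/options", "/resolution/next_actions"] else targets
    let targets := if PySem.Set.contains codes "DRIFT_TOO_HIGH" then
      targets ++ ["/resolution/answer", "/reflection/drift_flags", "/reflection/drift_score",
                  "/reflection/clarity_edits"] else targets
    let targets := if PySem.Set.contains codes "APPROVAL_NOT_GRANTED" then
      targets ++ ["/approval/constraints_passed", "/approval/approved", "/approval/reasons"] else targets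
    let targets := targets ++ ["/telemetry/retry_count"]
    PySem.List.sorted (PySem.Set.ofList targets) (fun x => x) false

-- ===== PORT B =====
def pvTargetMap : PySem.Dict String (List String) :=
  PySem.Dict.mk [
    ("GROUNDING_INCOMPLETE",
      ["/grounding/task", "/grounding/known_facts", "/grounding/constraints",
       "/grounding/output_contract", "/grounding/verification_hooks"]),
    ("EXPLORATION_INCOMPLETE",
      ["/exploration/approach_options", "/exploration/chosen_path", "/exploration/tradeoffs",
       "/exploration/alternative_interpretations", "/exploration/timebox_plan/stop_condition"]),
    ("RESOLUTION_INCOMPLETE",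
      ["/resolution/answer", "/resolution/options", "/resolution/next_actions"]),
    ("DRIFT_TOO_HIGH",
      ["/resolution/answer", "/reflection/drift_flags", "/reflection/drift_score",
       "/reflection/clarity_edits"]),
    ("APPROVAL_NOT_GRANTED",
      ["/approval/constraints_passed", "/approval/approved", "/approval/reasons"])]

def derive_edit_targets_alt (failures : List (List (String × String))) : List String :=
  let codes := pvCodes failures
  if PySem.Set.contains codes "SCHEMA_INVALID" then ["/"]
  else
    let out : PySem.Set String := PySem.Set.ofList ["/telemetry/retry_count"]
    let out := codes.foldl (fun s c => PySem.Set.update s (pvTargetMap.getD c [])) out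
    PySem.List.sorted out (fun x => x) false

-- ===== PRECONDITION & SPEC =====
-- Pre_ excludes exactly the inputs where some failure dict lacks the key "error_code": there both A and B raise KeyError.
def Pre_derive_edit_targets (failures : List (List (String × String))) : Prop :=
  (failures.all (fun f => f.any (fun p => p.1 == "error_code"))) = true
instance (failures : List (List (String × String))) : Decidable (Pre_derive_edit_targets failures) := by unfold Pre_derive_edit_targets; infer_instance
def pvWitness_derive_edit_targets : (List (List (String × String))) :=
  [[("error_code", "DRIFT_TOO_HIGH")], [("error_code", "GROUNDING_INCOMPLETE"), ("note", "x")]]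

def Spec_derive_edit_targets (failures : List (List (String × String))) (out : List String) : Prop := out = derive_edit_targets_alt failures
instance (failures : List (List (String × String))) (out : List String) : Decidable (Spec_derive_edit_targets failures out) := by unfold Spec_derive_edit_targets; infer_instance

-- ===== CLAIM (what is proved, stated in full; the proofs are below) =====
def Claim_equal_derive_edit_targets : Prop := ∀ (failures : List (List (String × String))), Dom_derive_edit_targets failures → Pre_derive_edit_targets failures → Spec_derive_edit_targets failures (derive_edit_targets failures)

-- ===== LEMMAS AND PROOFS =====

-- membership in B's set-update loop
theorem mem_foldl_update {α : Type} [BEq α] [LawfulBEq α] (g : α → List α) (l : List α)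
    (s : PySem.Set α) (x : α) :
    x ∈ l.foldl (fun s c => PySem.Set.update s (g c)) s ↔ x ∈ s ∨ ∃ c ∈ l, x ∈ g c := by
  induction l generalizing s with
  | nil => simp
  | cons c t ih =>
    simp only [List.foldl_cons, ih, PySem.Set.mem_update, List.mem_cons]
    constructor
    · rintro ((h | h) | ⟨d, hd, hx⟩)
      · exact Or.inl h
      · exact Or.inr ⟨c, Or.inl rfl, h⟩
      · exact Or.inr ⟨d, Or.inr hd, hx⟩
    · rintro (h | ⟨d, (rfl | hd), hx⟩)
      · exact Or.inl (Or.inl h)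
      · exact Or.inl (Or.inr hx)
      · exact Or.inr ⟨d, hd, hx⟩

-- B's set-update loop keeps the accumulator duplicate-free
theorem nodup_foldl_update {α : Type} [BEq α] [LawfulBEq α] (g : α → List α) (l : List α)
    (s : PySem.Set α) (h : s.Nodup) :
    (l.foldl (fun s c => PySem.Set.update s (g c)) s).Nodup := by
  induction l generalizing s with
  | nil => exact h
  | cons c t ih => exact ih _ (PySem.Set.nodup_update _ _ h)

-- the table as an if-chain
theorem pvTargetMap_getD (c : String) :
    pvTargetMap.getD c [] =
      if "GROUNDING_INCOMPLETE" = c then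
        ["/grounding/task", "/grounding/known_facts", "/grounding/constraints",
         "/grounding/output_contract", "/grounding/verification_hooks"]
      else if "EXPLORATION_INCOMPLETE" = c then
        ["/exploration/approach_options", "/exploration/chosen_path", "/exploration/tradeoffs",
         "/exploration/alternative_interpretations", "/exploration/timebox_plan/stop_condition"]
      else if "RESOLUTION_INCOMPLETE" = c then
        ["/resolution/answer", "/resolution/options", "/resolution/next_actions"]
      else if "DRIFT_TOO_HIGH" = c then
        ["/resolution/answer", "/reflection/drift_flags", "/reflection/drift_score",
         "/reflection/clarity_edits"]
      else if "APPROVAL_NOT_GRANTED" = c then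
        ["/approval/constraints_passed", "/approval/approved", "/approval/reasons"]
      else [] := by
  simp only [pvTargetMap, PySem.Dict.getD, PySem.Dict.get?_mk_cons, beq_iff_eq,
    (PySem.Dict.get?_eq_none_iff_contains (PySem.Dict.mk []) c).mpr rfl]
  split_ifs <;> rfl


-- the loop over present codes collects exactly the blocks of the codes that are present
theorem exists_code_iff (codes : List String) (x : String) :
    (∃ c ∈ codes, x ∈ pvTargetMap.getD c []) ↔
      ("GROUNDING_INCOMPLETE" ∈ codes ∧ x ∈ ["/grounding/task", "/grounding/known_facts",
        "/grounding/constraints", "/grounding/output_contract", "/grounding/verification_hooks"]) ∨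
      ("EXPLORATION_INCOMPLETE" ∈ codes ∧ x ∈ ["/exploration/approach_options", "/exploration/chosen_path",
        "/exploration/tradeoffs", "/exploration/alternative_interpretations", "/exploration/timebox_plan/stop_condition"]) ∨
      ("RESOLUTION_INCOMPLETE" ∈ codes ∧ x ∈ ["/resolution/answer", "/resolution/options", "/resolution/next_actions"]) ∨
      ("DRIFT_TOO_HIGH" ∈ codes ∧ x ∈ ["/resolution/answer", "/reflection/drift_flags",
        "/reflection/drift_score", "/reflection/clarity_edits"]) ∨
      ("APPROVAL_NOT_GRANTED" ∈ codes ∧ x ∈ ["/approval/constraints_passed", "/approval/approved", "/approval/reasons"]) := by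
  constructor
  · rintro ⟨c, hc, hx⟩
    rw [pvTargetMap_getD] at hx
    split_ifs at hx with h1 h2 h3 h4 h5
    · subst h1; exact Or.inl ⟨hc, hx⟩
    · subst h2; exact Or.inr (Or.inl ⟨hc, hx⟩)
    · subst h3; exact Or.inr (Or.inr (Or.inl ⟨hc, hx⟩))
    · subst h4; exact Or.inr (Or.inr (Or.inr (Or.inl ⟨hc, hx⟩)))
    · subst h5; exact Or.inr (Or.inr (Or.inr (Or.inr ⟨hc, hx⟩)))
    · simp at hx
  · rintro (⟨h, hx⟩ | ⟨h, hx⟩ | ⟨h, hx⟩ | ⟨h, hx⟩ | ⟨h, hx⟩) <;>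
      exact ⟨_, h, by rw [pvTargetMap_getD]; simp only [reduceIte]; exact hx⟩

-- ===== VERDICT (by name: the statement is the Claim_ definition above) =====
set_option maxHeartbeats 2000000 in
theorem derive_edit_targets_spec : Claim_equal_derive_edit_targets := by
  intro failures _ _
  unfold Spec_derive_edit_targets derive_edit_targets derive_edit_targets_alt
  set codes := pvCodes failures with hcodes
  by_cases hs : "SCHEMA_INVALID" ∈ codes
  · simp [hs]
  · simp only [PySem.Set.contains_eq_listContains, List.contains_iff_mem]
    rw [if_neg hs, if_neg hs, PySem.List.sorted_id_eq_sorted_id_iff_perm]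
    apply (List.perm_ext_iff_of_nodup (PySem.Set.nodup_ofList _)
      (nodup_foldl_update _ _ _ (PySem.Set.nodup_ofList _))).2
    intro x
    rw [PySem.Set.mem_ofList, mem_foldl_update, exists_code_iff]
    by_cases hG : "GROUNDING_INCOMPLETE" ∈ codes <;>
    by_cases hE : "EXPLORATION_INCOMPLETE" ∈ codes <;>
    by_cases hR : "RESOLUTION_INCOMPLETE" ∈ codes <;>
    by_cases hD : "DRIFT_TOO_HIGH" ∈ codes <;>
    by_cases hA : "APPROVAL_NOT_GRANTED" ∈ codes <;>
    · simp only [hG, hE, hR, hD, hA, if_true, if_false, PySem.Set.mem_ofList,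
        List.mem_append, List.mem_cons, List.not_mem_nil, List.mem_singleton,
        List.nil_append, false_or, false_and, not_false_iff, true_and, or_false]
      try tauto
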